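-- pv_equiv track=rewrite | github.com/GMadavan2005/hopes | backend/app/services/musicbrainz_service.py | identify_era
-- ===== SOURCE A (Python) =====
-- def identify_era(year: int) -> str:
--     if not year:
--         return None
--
--     era_map = {
--         (1950, 1959): "1950s",
--         (1960, 1969): "1960s",
--         (1970, 1979): "1970s",
--         (1980, 1989): "1980s",
--         (1990, 1999): "1990s",
--         (2000, 2009): "2000s",
--         (2010, 2019): "2010s",
--         (2020, 2029): "2020s"
--     }
--
--     for (start, end), era in era_map.items():
--         if start <= year <= end:
--             return era
--     return None
-- ===== SOURCE B (Python) =====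
-- def identify_era(year: int) -> str:
--     if 1950 <= year <= 2029:
--         return f"{year // 10 * 10}s"
--     return None
-- ===== Notes on version B (the rewrite author's own statement) =====
-- stated objective: idiomatic
-- what changed: Replaced the dict of decade ranges and its linear scan with a single bound check and closed-form integer arithmetic (year // 10 * 10) to build the era string.
import Mathlib
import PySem

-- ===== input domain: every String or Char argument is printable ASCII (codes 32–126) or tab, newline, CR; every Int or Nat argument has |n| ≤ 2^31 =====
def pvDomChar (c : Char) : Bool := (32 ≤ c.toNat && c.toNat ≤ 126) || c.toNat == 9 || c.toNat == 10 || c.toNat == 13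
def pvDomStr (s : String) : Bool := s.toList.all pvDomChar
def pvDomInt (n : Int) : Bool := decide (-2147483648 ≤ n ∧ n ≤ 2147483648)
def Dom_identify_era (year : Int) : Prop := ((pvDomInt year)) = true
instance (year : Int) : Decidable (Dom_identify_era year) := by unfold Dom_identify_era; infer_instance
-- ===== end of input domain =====

-- B replaces A's range-table scan with one bound check and closed-form arithmetic (idiomatic).

-- ===== PORT A =====
-- the for-loop over era_map.items(): first matching range wins
def eraScan (year : Int) : List ((Int × Int) × String) → Option String
  | [] => none
  | ((s, e), era) :: rest => if s ≤ year ∧ year ≤ e then some era else eraScan year rest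

def identify_era (year : Int) : Option String :=
  if year == 0 then none
  else
    eraScan year
      [((1950, 1959), "1950s"), ((1960, 1969), "1960s"), ((1970, 1979), "1970s"),
       ((1980, 1989), "1980s"), ((1990, 1999), "1990s"), ((2000, 2009), "2000s"),
       ((2010, 2019), "2010s"), ((2020, 2029), "2020s")]

-- ===== PORT B =====
def identify_era_alt (year : Int) : Option String :=
  if 1950 ≤ year ∧ year ≤ 2029 then
    some (PySem.Int.toStr (PySem.Int.floordiv year 10 * 10) ++ "s")
  else none

-- ===== PRECONDITION & SPEC =====
def Spec_identify_era (year : Int) (out : Option String) : Prop := out = identify_era_alt year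
instance (year : Int) (out : Option String) : Decidable (Spec_identify_era year out) := by unfold Spec_identify_era; infer_instance

-- ===== CLAIM (what is proved, stated in full; the proofs are below) =====
def Claim_equal_identify_era : Prop := ∀ (year : Int), Dom_identify_era year → Spec_identify_era year (identify_era year)

-- ===== LEMMAS AND PROOFS =====
theorem fd10 (year q : Int) (h1 : q * 10 ≤ year) (h2 : year < (q + 1) * 10) :
    PySem.Int.floordiv year 10 = q := by
  rw [PySem.Int.floordiv_eq_iff_of_pos (by norm_num)]
  omega

-- ===== VERDICT (by name: the statement is the Claim_ definition above) =====
theorem identify_era_spec : Claim_equal_identify_era := by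
  intro year _
  show identify_era year = identify_era_alt year
  simp only [identify_era, identify_era_alt, eraScan, beq_iff_eq]
  split_ifs <;>
    first
      | rfl
      | omega
      | (rw [fd10 year 195 (by omega) (by omega)]; decide)
      | (rw [fd10 year 196 (by omega) (by omega)]; decide)
      | (rw [fd10 year 197 (by omega) (by omega)]; decide)
      | (rw [fd10 year 198 (by omega) (by omega)]; decide)
      | (rw [fd10 year 199 (by omega) (by omega)]; decide)
      | (rw [fd10 year 200 (by omega) (by omega)]; decide)
      | (rw [fd10 year 201 (by omega) (by omega)]; decide)
      | (rw [fd10 year 202 (by omega) (by omega)]; decide)
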